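-- pv_equiv track=rewrite | github.com/nfpltech3/CFS-Invoice-Extractor | CFS_Invoice_Extractor.py | map_organization
-- ===== SOURCE A (Python) =====
-- ORG_MAPPING_RULES = {
--     "gateway distriparks": ("GATEWAY DISTRIPARKS LTD.", "Gateway"),
--     "gateway": ("GATEWAY DISTRIPARKS LTD.", "Gateway"),
--     "ameya logistics": ("AMEYA LOGISTICS PVT. LTD.", "Ameya"),
--     "ameya": ("AMEYA LOGISTICS PVT. LTD.", "Ameya"),
--     "psa ameya": ("AMEYA LOGISTICS PVT. LTD.", "Ameya"),
--     "allcargo terminals": ("ALLCARGO TERMINALS LIMITED", "Allcargo"),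
--     "allcargo": ("ALLCARGO TERMINALS LIMITED", "Allcargo"),
--     "j m baxi": ("J M BAXI PORTS & LOGISTICS LTD.-V- (ICT INNFRA.PVT.LTD.)", "J M Baxi"),
--     "jm baxi": ("J M BAXI PORTS & LOGISTICS LTD.-V- (ICT INNFRA.PVT.LTD.)", "J M Baxi"),
--     "jwr logistics": ("JWR LOGISTICS PVT LTD", "JWR"),
--     "jwc logistics": ("JWC LOGISTICS PARK PVT.LTD.", "JWC"),
--     "ashte logistics": ("ASHTE LOGISTICS PVT LTD", "Ashte"),
-- }
--
-- def map_organization(vendor_name):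
--     """Map extracted vendor name to (Logisys org name, short name for narration, matched_keyword).
--     Returns tuple: (logisys_name, short_name, matched_keyword)"""
--     if not vendor_name:
--         return "UNKNOWN VENDOR", "UNKNOWN", None
--     v_lower = vendor_name.lower().strip()
--     # Check longer keys first for specificity (e.g., "gateway distriparks" before "gateway")
--     for key in sorted(ORG_MAPPING_RULES.keys(), key=len, reverse=True):
--         if key in v_lower:
--             return ORG_MAPPING_RULES[key][0], ORG_MAPPING_RULES[key][1], key
--     return f"UNKNOWN - {vendor_name}", vendor_name, None
-- ===== SOURCE B (Python) =====
-- ORG_MAPPING_RULES = {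
--     "gateway distriparks": ("GATEWAY DISTRIPARKS LTD.", "Gateway"),
--     "gateway": ("GATEWAY DISTRIPARKS LTD.", "Gateway"),
--     "ameya logistics": ("AMEYA LOGISTICS PVT. LTD.", "Ameya"),
--     "ameya": ("AMEYA LOGISTICS PVT. LTD.", "Ameya"),
--     "psa ameya": ("AMEYA LOGISTICS PVT. LTD.", "Ameya"),
--     "allcargo terminals": ("ALLCARGO TERMINALS LIMITED", "Allcargo"),
--     "allcargo": ("ALLCARGO TERMINALS LIMITED", "Allcargo"),
--     "j m baxi": ("J M BAXI PORTS & LOGISTICS LTD.-V- (ICT INNFRA.PVT.LTD.)", "J M Baxi"),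
--     "jm baxi": ("J M BAXI PORTS & LOGISTICS LTD.-V- (ICT INNFRA.PVT.LTD.)", "J M Baxi"),
--     "jwr logistics": ("JWR LOGISTICS PVT LTD", "JWR"),
--     "jwc logistics": ("JWC LOGISTICS PARK PVT.LTD.", "JWC"),
--     "ashte logistics": ("ASHTE LOGISTICS PVT LTD", "Ashte"),
-- }
--
-- def map_organization(vendor_name):
--     """Collect all matching keywords in insertion order, then pick the longest one
--     (max is stable: first maximal in insertion order = A's stable-sort tie-break)."""
--     if not vendor_name:
--         return "UNKNOWN VENDOR", "UNKNOWN", None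
--     v_lower = vendor_name.lower().strip()
--     matches = [k for k in ORG_MAPPING_RULES if k in v_lower]
--     if not matches:
--         return f"UNKNOWN - {vendor_name}", vendor_name, None
--     best = max(matches, key=len)
--     org, short = ORG_MAPPING_RULES[best]
--     return org, short, best
-- ===== Notes on version B (the rewrite author's own statement) =====
-- stated objective: simpler
-- what changed: Replaces the up-front length-descending sort with first-substring-match early exit by a single insertion-order pass that collects all matching keywords and then selects the longest with max(key=len), whose first-maximal tie-break matches the stable sort.
import Mathlib
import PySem

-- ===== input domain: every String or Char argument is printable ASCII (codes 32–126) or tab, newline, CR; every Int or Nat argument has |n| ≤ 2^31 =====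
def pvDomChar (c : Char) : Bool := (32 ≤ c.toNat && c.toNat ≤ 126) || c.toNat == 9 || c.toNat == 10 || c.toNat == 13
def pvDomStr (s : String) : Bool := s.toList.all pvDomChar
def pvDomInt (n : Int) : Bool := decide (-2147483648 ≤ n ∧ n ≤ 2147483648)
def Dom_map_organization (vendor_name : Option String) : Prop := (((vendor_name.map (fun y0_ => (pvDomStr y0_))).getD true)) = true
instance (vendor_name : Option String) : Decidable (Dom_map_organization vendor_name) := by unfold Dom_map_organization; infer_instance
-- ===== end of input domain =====

-- B replaces A's sort-by-length-then-first-match loop by collecting all matching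
-- keywords in insertion order and picking the longest (objective: simpler decomposition).

-- ===== PORT A =====
-- ORG_MAPPING_RULES (shared module-level constant of both Pythons)
def orgRules : PySem.Dict String (String × String) := PySem.Dict.ofList [
  ("gateway distriparks", ("GATEWAY DISTRIPARKS LTD.", "Gateway")),
  ("gateway", ("GATEWAY DISTRIPARKS LTD.", "Gateway")),
  ("ameya logistics", ("AMEYA LOGISTICS PVT. LTD.", "Ameya")),
  ("ameya", ("AMEYA LOGISTICS PVT. LTD.", "Ameya")),
  ("psa ameya", ("AMEYA LOGISTICS PVT. LTD.", "Ameya")),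
  ("allcargo terminals", ("ALLCARGO TERMINALS LIMITED", "Allcargo")),
  ("allcargo", ("ALLCARGO TERMINALS LIMITED", "Allcargo")),
  ("j m baxi", ("J M BAXI PORTS & LOGISTICS LTD.-V- (ICT INNFRA.PVT.LTD.)", "J M Baxi")),
  ("jm baxi", ("J M BAXI PORTS & LOGISTICS LTD.-V- (ICT INNFRA.PVT.LTD.)", "J M Baxi")),
  ("jwr logistics", ("JWR LOGISTICS PVT LTD", "JWR")),
  ("jwc logistics", ("JWC LOGISTICS PARK PVT.LTD.", "JWC")),
  ("ashte logistics", ("ASHTE LOGISTICS PVT LTD", "Ashte"))]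

-- ORG_MAPPING_RULES[key]; every key looked up is a dict key, so the default is never used
def rulesAt (k : String) : String × String := PySem.Dict.getD orgRules k ("", "")

-- A's for-loop over the sorted keys with early return
def mapOrgLoopA : List String → String → String → String × String × Option String
  | [], _, v => ("UNKNOWN - " ++ v, v, none)
  | k :: rest, vl, v =>
    if PySem.Str.isIn k vl then ((rulesAt k).1, (rulesAt k).2, some k)
    else mapOrgLoopA rest vl v

def map_organization (vendor_name : Option String) : String × String × Option String :=
  match vendor_name with
  | none => ("UNKNOWN VENDOR", "UNKNOWN", none)          -- `not vendor_name`: None …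
  | some v =>
    if v = "" then ("UNKNOWN VENDOR", "UNKNOWN", none)   -- … or empty string
    else
      let vl := PySem.Str.strip (PySem.Str.lower v)
      mapOrgLoopA (PySem.List.sorted orgRules.keys (fun k => PySem.Str.len k) true) vl v

-- ===== PORT B =====
def map_organization_alt (vendor_name : Option String) : String × String × Option String :=
  match vendor_name with
  | none => ("UNKNOWN VENDOR", "UNKNOWN", none)
  | some v =>
    if v = "" then ("UNKNOWN VENDOR", "UNKNOWN", none)
    else
      let vl := PySem.Str.strip (PySem.Str.lower v)
      let hits := orgRules.keys.filter (fun k => PySem.Str.isIn k vl)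
      match PySem.List.max? hits (fun k => PySem.Str.len k) with
      | none => ("UNKNOWN - " ++ v, v, none)
      | some best => ((rulesAt best).1, (rulesAt best).2, some best)

-- ===== PRECONDITION & SPEC =====
def Spec_map_organization (vendor_name : Option String) (out : String × String × Option String) : Prop := out = map_organization_alt vendor_name
instance (vendor_name : Option String) (out : String × String × Option String) : Decidable (Spec_map_organization vendor_name out) := by unfold Spec_map_organization; infer_instance

-- ===== CLAIM (what is proved, stated in full; the proofs are below) =====
def Claim_equal_map_organization : Prop := ∀ (vendor_name : Option String), Dom_map_organization vendor_name → Spec_map_organization vendor_name (map_organization vendor_name)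

-- ===== LEMMAS AND PROOFS =====

-- A's loop is the first match of the key list, finished with the same fallback / lookup
theorem mapOrgLoopA_eq_find? (ks : List String) (vl v : String) :
    mapOrgLoopA ks vl v
      = match ks.find? (fun k => PySem.Str.isIn k vl) with
        | none => ("UNKNOWN - " ++ v, v, none)
        | some k => ((rulesAt k).1, (rulesAt k).2, some k) := by
  induction ks with
  | nil => rfl
  | cons k rest ih =>
    by_cases h : PySem.Chars.isIn k.toList vl.toList = true <;>
      simp [mapOrgLoopA, List.find?, h, ih]

-- the stable length-descending sort of the rule keys, evaluated
theorem sorted_keys_eval :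
    PySem.List.sorted orgRules.keys (fun k => PySem.Str.len k) true
      = ["gateway distriparks","allcargo terminals","ameya logistics","ashte logistics",
         "jwr logistics","jwc logistics","psa ameya","allcargo","j m baxi","gateway",
         "jm baxi","ameya"] := by decide

-- first substring match in stable length-descending order = longest (first-maximal) match in insertion order
theorem sel_eq (vl : String) :
    (["gateway distriparks","allcargo terminals","ameya logistics","ashte logistics",
      "jwr logistics","jwc logistics","psa ameya","allcargo","j m baxi","gateway",
      "jm baxi","ameya"] : List String).find? (fun k => PySem.Str.isIn k vl)
      = PySem.List.max? (orgRules.keys.filter (fun k => PySem.Str.isIn k vl))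
          (fun k => PySem.Str.len k) := by
  have hk : orgRules.keys
      = ["gateway distriparks","gateway","ameya logistics","ameya","psa ameya",
         "allcargo terminals","allcargo","j m baxi","jm baxi","jwr logistics",
         "jwc logistics","ashte logistics"] := by decide
  rw [hk]
  simp only [List.find?, List.filter]
  generalize PySem.Str.isIn "gateway distriparks" vl = b1
  generalize PySem.Str.isIn "allcargo terminals" vl = b2
  generalize PySem.Str.isIn "ameya logistics" vl = b3
  generalize PySem.Str.isIn "ashte logistics" vl = b4
  generalize PySem.Str.isIn "jwr logistics" vl = b5
  generalize PySem.Str.isIn "jwc logistics" vl = b6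
  generalize PySem.Str.isIn "psa ameya" vl = b7
  generalize PySem.Str.isIn "allcargo" vl = b8
  generalize PySem.Str.isIn "j m baxi" vl = b9
  generalize PySem.Str.isIn "gateway" vl = b10
  generalize PySem.Str.isIn "jm baxi" vl = b11
  generalize PySem.Str.isIn "ameya" vl = b12
  revert b1 b2 b3 b4 b5 b6 b7 b8 b9 b10 b11 b12
  decide

-- ===== VERDICT (by name: the statement is the Claim_ definition above) =====
theorem map_organization_spec : Claim_equal_map_organization := by
  intro vendor_name _
  unfold Spec_map_organization map_organization map_organization_alt
  match vendor_name with
  | none => rfl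
  | some v =>
    by_cases hv : v = ""
    · simp [hv]
    · simp only [hv, if_false]
      rw [sorted_keys_eval, mapOrgLoopA_eq_find?, sel_eq]
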